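-- pv_equiv track=rewrite | github.com/AraKchrUser/yandex-algorithm-trainings | 7 -- Event sorting/Algorithm_training _1.0/A.py | student_cnt
-- ===== SOURCE A (Python) =====
-- def student_cnt(events, students):
--     visible = 0
--     cnt = 0
--     flg = 1
--
--     for i in range(len(events)):
--         if cnt > 0:
--             visible += events[i][0] - events[i - 1][0]
--             if flg:
--                 visible += 1
--                 flg = 0
--         if events[i][1] == -1:
--             cnt += 1
--         else:
--             cnt -= 1
--         if cnt == 0:
--             flg = 1
--
--     return students - visible
-- ===== SOURCE B (Python) =====
-- def student_cnt(events, students):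
--     # Stage 1: running nesting depth after each event.
--     depths = []
--     d = 0
--     for _, t in events:
--         d += 1 if t == -1 else -1
--         depths.append(d)
--     # Stage 2: a covered segment starts where depth steps 0->1 and ends where it
--     # steps 1->0; total covered length = sum(ends) - sum(starts) + #segments.
--     starts = [p for (p, t), d in zip(events, depths) if t == -1 and d == 1]
--     ends = [p for (p, t), d in zip(events, depths) if t != -1 and d == 0]
--     return students - (sum(ends) - sum(starts) + len(ends))
-- ===== Notes on version B (the rewrite author's own statement) =====
-- stated objective: alternative
-- what changed: B is staged: it first builds the prefix-depth list, then filters the positions where depth steps 0->1 (segment starts) and 1->0 (segment ends), and computes covered length in closed form as sum(ends) - sum(starts) + #segments, instead of A's single sweep accumulating pairwise gaps with a one-off +1 flag and an events[i-1] lookback.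
-- outside the precondition, e.g. on student_cnt([(0, -1), (5, -1)], 10): A returns 4, B returns 10
import Mathlib
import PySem

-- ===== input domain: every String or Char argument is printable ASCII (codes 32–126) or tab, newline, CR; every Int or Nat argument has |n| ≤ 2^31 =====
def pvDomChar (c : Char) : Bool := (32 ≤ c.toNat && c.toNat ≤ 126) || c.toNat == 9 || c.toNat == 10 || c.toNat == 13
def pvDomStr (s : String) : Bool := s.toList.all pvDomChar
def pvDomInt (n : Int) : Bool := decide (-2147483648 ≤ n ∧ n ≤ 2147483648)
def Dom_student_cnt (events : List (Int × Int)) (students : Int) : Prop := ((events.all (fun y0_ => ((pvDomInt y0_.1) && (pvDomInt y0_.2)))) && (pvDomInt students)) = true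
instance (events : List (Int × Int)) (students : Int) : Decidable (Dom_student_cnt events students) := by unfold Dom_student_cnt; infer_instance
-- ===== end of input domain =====

-- B replaces A's single depth-sweep (pairwise gaps + a one-off +1 flag, reading events[i-1]) by
-- staged passes: a prefix-depth scan, then filters picking segment starts (depth 0->1) and ends
-- (depth 1->0), with covered length = sum(ends) - sum(starts) + #segments: a different decomposition.


-- ===== PORT A =====
-- A's loop reads events[i] and events[i-1]; the recursion threads the previous position `prev`.
-- At i = 0 Python's events[i-1] is the wrap-around read events[-1], but that read is dead
-- (cnt = 0 there, so the branch using it is not taken): threading a dummy initial prev = 0 is exact.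
def loopA : List (Int × Int) → Int → Int → Int → Int → Int
  | [], _prev, visible, _cnt, _flg => visible
  | (p, t) :: rest, prev, visible, cnt, flg =>
    let visible := if 0 < cnt then visible + (p - prev) + (if flg ≠ 0 then 1 else 0) else visible
    let flg := if 0 < cnt ∧ flg ≠ 0 then 0 else flg
    let cnt := if t = -1 then cnt + 1 else cnt - 1
    let flg := if cnt = 0 then 1 else flg
    loopA rest p visible cnt flg

def student_cnt (events : List (Int × Int)) (students : Int) : Int :=
  students - loopA events 0 0 0 1

-- ===== PORT B =====
-- Stage 1 of Source B: the list of running depths after each event.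
def depthsB : List (Int × Int) → Int → List Int
  | [], _ => []
  | (_, t) :: rest, d =>
    let d' := if t = -1 then d + 1 else d - 1
    d' :: depthsB rest d'

-- Stage 2 of Source B: the two comprehensions over zip(events, depths).
def student_cnt_alt (events : List (Int × Int)) (students : Int) : Int :=
  let depths := depthsB events 0
  let starts := (events.zip depths).filterMap
    (fun x => if x.1.2 = -1 ∧ x.2 = 1 then some x.1.1 else none)
  let ends := (events.zip depths).filterMap
    (fun x => if x.1.2 ≠ -1 ∧ x.2 = 0 then some x.1.1 else none)
  students - (ends.sum - starts.sum + (ends.length : Int))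

-- ===== PRECONDITION & SPEC =====
-- Pre_ excludes event lists with more opens (second component -1) than closes, i.e. with a
-- never-closed interval: there A counts the open segment up to the last event while B ignores the
-- unterminated segment — an unspecified corner of malformed input on which both values are defensible.
def Pre_student_cnt (events : List (Int × Int)) (_students : Int) : Prop :=
  2 * (events.countP (fun e => e.2 = -1)) ≤ events.length

instance (events : List (Int × Int)) (students : Int) : Decidable (Pre_student_cnt events students) := by
  unfold Pre_student_cnt; infer_instance

def pvWitness_student_cnt : (List (Int × Int)) × Int := ([(1, -1), (3, 1), (7, -1), (9, 2)], 20)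

def Spec_student_cnt (events : List (Int × Int)) (students : Int) (out : Int) : Prop := out = student_cnt_alt events students
instance (events : List (Int × Int)) (students : Int) (out : Int) : Decidable (Spec_student_cnt events students out) := by unfold Spec_student_cnt; infer_instance

-- ===== CLAIM (what is proved, stated in full; the proofs are below) =====
def Claim_equal_student_cnt : Prop := ∀ (events : List (Int × Int)) (students : Int), Dom_student_cnt events students → Pre_student_cnt events students → Spec_student_cnt events students (student_cnt events students)

-- ===== LEMMAS AND PROOFS =====

-- signed balance of an event list: +1 per open (second component -1), -1 per close
def pvBal (l : List (Int × Int)) : Int :=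
  (l.map (fun e => if e.2 = -1 then (1 : Int) else -1)).sum

theorem pvBal_cons (e : Int × Int) (l : List (Int × Int)) :
    pvBal (e :: l) = (if e.2 = -1 then (1 : Int) else -1) + pvBal l := by
  simp [pvBal]

theorem pvBal_of_count (l : List (Int × Int)) :
    pvBal l = 2 * (l.countP (fun e => e.2 = -1)) - l.length := by
  induction l with
  | nil => simp [pvBal]
  | cons e rest ih =>
    rw [pvBal_cons, ih]
    by_cases h : e.2 = -1 <;> simp [h] <;> ring

-- recursive restatement of B's staged value: processing remainder l from depth d,
-- pvF l d = (sum of ends) - (sum of starts) + (number of ends)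
def pvF : List (Int × Int) → Int → Int
  | [], _ => 0
  | (p, t) :: rest, d =>
    if t = -1 then (if d + 1 = 1 then -p else 0) + pvF rest (d + 1)
    else (if d - 1 = 0 then p + 1 else 0) + pvF rest (d - 1)

-- B's staged filters/sums compute pvF
theorem staged_eq_pvF (l : List (Int × Int)) : ∀ d : Int,
    ((l.zip (depthsB l d)).filterMap
      (fun x => if x.1.2 ≠ -1 ∧ x.2 = 0 then some x.1.1 else none)).sum
    - ((l.zip (depthsB l d)).filterMap
      (fun x => if x.1.2 = -1 ∧ x.2 = 1 then some x.1.1 else none)).sum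
    + (((l.zip (depthsB l d)).filterMap
      (fun x => if x.1.2 ≠ -1 ∧ x.2 = 0 then some x.1.1 else none)).length : Int)
    = pvF l d := by
  induction l with
  | nil => intro d; simp [depthsB, pvF]
  | cons e rest ih =>
    rcases e with ⟨p, t⟩
    intro d
    simp only [ne_eq] at ih ⊢
    by_cases ht : t = -1 <;>
      simp only [depthsB, pvF, List.zip_cons_cons, List.filterMap_cons, ht, if_pos, if_neg,
        ne_eq, not_true_eq_false, not_false_eq_true, false_and, true_and,
        if_false] <;>
      split_ifs with h <;>
      simp only [List.sum_cons, List.length_cons] <;>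
      push_cast <;> rw [← ih] <;> omega

-- the coupled invariant: provided the remaining list keeps the final depth ≤ 0,
-- (1) between segments (cnt ≤ 0, flg = 1) loopA computes v + pvF for any prev;
-- (2) at the start of a covered run (cnt > 0, flg = 1) loopA lags pvF by prev (the run's start);
-- (3) mid-run (cnt > 0, flg = 0) loopA lags pvF by prev + 1.
theorem loop_key (l : List (Int × Int)) :
    ∀ (v cnt prev : Int), cnt + pvBal l ≤ 0 →
      (cnt ≤ 0 → loopA l prev v cnt 1 = v + pvF l cnt) ∧
      (0 < cnt → loopA l prev v cnt 1 = v + pvF l cnt - prev) ∧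
      (0 < cnt → loopA l prev v cnt 0 = v + pvF l cnt - prev - 1) := by
  induction l with
  | nil =>
    intro v cnt prev hbal
    simp only [pvBal, List.map_nil, List.sum_nil, add_zero] at hbal
    exact ⟨fun _ => by simp [loopA, pvF], fun h => by omega, fun h => by omega⟩
  | cons e rest ih =>
    rcases e with ⟨p, t⟩
    intro v cnt prev hbal
    rw [pvBal_cons] at hbal
    by_cases ht : t = -1
    · have hb : cnt + 1 + pvBal rest ≤ 0 := by simp [ht] at hbal; omega
      refine ⟨fun hc => ?_, fun hc => ?_, fun hc => ?_⟩ <;>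
        simp only [loopA, pvF, ht, reduceIte] <;> split_ifs <;> try omega
      all_goals first
        | (have h := (ih v (cnt + 1) p hb).1 (by omega); omega)
        | (have h := (ih v (cnt + 1) p hb).2.1 (by omega); omega)
        | (have h := (ih (v + (p - prev) + 1) (cnt + 1) p hb).2.2 (by omega); omega)
        | (have h := (ih (v + (p - prev) + 0) (cnt + 1) p hb).2.2 (by omega); omega)
    · have hb : cnt - 1 + pvBal rest ≤ 0 := by simp [ht] at hbal; omega
      refine ⟨fun hc => ?_, fun hc => ?_, fun hc => ?_⟩ <;>
        simp only [loopA, pvF, ht, reduceIte] <;> split_ifs <;> try omega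
      all_goals first
        | (have h := (ih v (cnt - 1) p hb).1 (by omega); omega)
        | (have h := (ih (v + (p - prev) + 1) (cnt - 1) p hb).1 (by omega); omega)
        | (have h := (ih (v + (p - prev) + 0) (cnt - 1) p hb).1 (by omega); omega)
        | (have h := (ih (v + (p - prev) + 1) (cnt - 1) p hb).2.2 (by omega); omega)
        | (have h := (ih (v + (p - prev) + 0) (cnt - 1) p hb).2.2 (by omega); omega)

-- ===== VERDICT (by name: the statement is the Claim_ definition above) =====
theorem student_cnt_spec : Claim_equal_student_cnt := by
  intro events students _hdom hpre
  unfold Spec_student_cnt student_cnt student_cnt_alt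
  have hbal : (0 : Int) + pvBal events ≤ 0 := by
    rw [pvBal_of_count]
    unfold Pre_student_cnt at hpre
    omega
  have h1 := (loop_key events 0 0 0 hbal).1 (by omega)
  have h2 := staged_eq_pvF events 0
  simp only [h1]
  omega
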